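-- pv_equiv track=rewrite | github.com/A5jadAli/mit-winter-contest | beginner_round/mit_time.py | get_mit_time_classification
-- ===== SOURCE A (Python) =====
-- def get_mit_time_classification(N):
--     """
--     Determine the MIT time classification for N minutes late.
--     Returns the appropriate string format: "MIT time" or "MIT^k time"
--     """
--     if N <= 5:
--         return "MIT time"
--
--     # Find the appropriate power k where 5^(k-1) < N <= 5^k
--     power = 2
--     prev_limit = 5
--
--     while True:
--         current_limit = prev_limit * 5
--         if prev_limit < N <= current_limit:
--             return f"MIT^{power} time"
--         power += 1
--         prev_limit = current_limit
--
--         # Safety check for large numbers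
--         if current_limit > 10**9:
--             break
-- ===== SOURCE B (Python) =====
-- _THRESHOLDS = [5 ** k for k in range(1, 14)]  # 5, 25, ..., 5**13
--
-- def get_mit_time_classification(N):
--     if N <= 5:
--         return "MIT time"
--     # binary search for the first threshold >= N (bisect_left)
--     lo, hi = 0, len(_THRESHOLDS)
--     while lo < hi:
--         mid = (lo + hi) // 2
--         if _THRESHOLDS[mid] < N:
--             lo = mid + 1
--         else:
--             hi = mid
--     return f"MIT^{lo + 1} time"
-- ===== Notes on version B (the rewrite author's own statement) =====
-- stated objective: alternative
-- what changed: Replaces A's multiply-and-compare while-loop with a precomputed table of powers of 5 and a hand-written bisect_left binary search over it.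
-- outside the precondition, e.g. on get_mit_time_classification(1300000000): A returns None, B returns 'MIT^14 time'
import Mathlib
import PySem

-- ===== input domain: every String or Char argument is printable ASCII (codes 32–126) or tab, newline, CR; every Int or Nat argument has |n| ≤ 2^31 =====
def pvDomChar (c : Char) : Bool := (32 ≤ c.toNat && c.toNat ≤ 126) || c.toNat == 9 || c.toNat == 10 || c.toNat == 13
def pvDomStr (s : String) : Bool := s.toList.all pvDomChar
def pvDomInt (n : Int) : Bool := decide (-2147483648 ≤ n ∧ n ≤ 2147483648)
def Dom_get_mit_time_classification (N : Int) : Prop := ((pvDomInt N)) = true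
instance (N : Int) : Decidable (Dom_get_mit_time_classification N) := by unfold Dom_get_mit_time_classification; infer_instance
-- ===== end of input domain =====

-- ===== PORT A =====
-- A: early return for N <= 5, then a while-True multiply loop; the loop is ported with
-- fuel 13 (power runs 2..13 before the 10^9 safety break fires, so fuel is never exhausted
-- on Pre_; the `none` branch corresponds to Python's `break` that returns None).
def pvLoopA (N : Int) : Nat → Int → Int → Option String
  | 0, _, _ => none
  | f + 1, power, prev_limit =>
    let current_limit := prev_limit * 5
    if prev_limit < N ∧ N ≤ current_limit then
      some ("MIT^" ++ PySem.Int.toStr power ++ " time")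
    else if current_limit > 10 ^ 9 then
      none
    else
      pvLoopA N f (power + 1) current_limit

def get_mit_time_classification (N : Int) : String :=
  if N ≤ 5 then "MIT time"
  else (pvLoopA N 13 2 5).getD ""   -- None (N > 5^13) is excluded by Pre_

-- ===== PORT B =====
def pvThresholds : List Int :=
  [5, 25, 125, 625, 3125, 15625, 78125, 390625, 1953125, 9765625, 48828125, 244140625, 1220703125]

-- bisect_left binary search; `while lo < hi` ported with fuel 13 (hi - lo starts at 13 and
-- shrinks each step). Indexing uses getD: mid is always a valid index of the fixed table.
def pvBisect (N : Int) : Nat → Nat → Nat → Nat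
  | 0, lo, _ => lo
  | f + 1, lo, hi =>
    if lo < hi then
      let mid := (lo + hi) / 2
      if pvThresholds.getD mid 0 < N then pvBisect N f (mid + 1) hi
      else pvBisect N f lo mid
    else lo

def get_mit_time_classification_alt (N : Int) : String :=
  if N ≤ 5 then "MIT time"
  else "MIT^" ++ PySem.Int.toStr ((pvBisect N 13 0 13 : Nat) + 1) ++ " time"

-- ===== PRECONDITION & SPEC =====
-- Pre_ excludes N > 5^13 = 1220703125, where A's safety break makes it return None
-- (not a string); B naturally returns "MIT^14 time" there.
def Pre_get_mit_time_classification (N : Int) : Prop := N ≤ 1220703125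
instance (N : Int) : Decidable (Pre_get_mit_time_classification N) := by unfold Pre_get_mit_time_classification; infer_instance
def pvWitness_get_mit_time_classification : Int := 7
def Spec_get_mit_time_classification (N : Int) (out : String) : Prop := out = get_mit_time_classification_alt N
instance (N : Int) (out : String) : Decidable (Spec_get_mit_time_classification N out) := by unfold Spec_get_mit_time_classification; infer_instance

-- ===== CLAIM (what is proved, stated in full; the proofs are below) =====
def Claim_equal_get_mit_time_classification : Prop := ∀ (N : Int), Dom_get_mit_time_classification N → Pre_get_mit_time_classification N → Spec_get_mit_time_classification N (get_mit_time_classification N)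

-- ===== LEMMAS AND PROOFS =====

-- one-step unfolding equations for the two fuelled loops (lets inlined; both are rfl)
lemma pvLoopA_succ (N : Int) (f : Nat) (p l : Int) :
    pvLoopA N (f+1) p l = if l < N ∧ N ≤ l*5 then some ("MIT^" ++ PySem.Int.toStr p ++ " time")
      else if l*5 > 10^9 then none else pvLoopA N f (p+1) (l*5) := rfl

lemma pvBisect_succ (N : Int) (f : Nat) (lo hi : Nat) :
    pvBisect N (f+1) lo hi = if lo < hi then
      (if pvThresholds.getD ((lo+hi)/2) 0 < N then pvBisect N f ((lo+hi)/2+1) hi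
       else pvBisect N f lo ((lo+hi)/2)) else lo := rfl

-- per-interval evaluation lemmas: for 5^(k-1) < N ≤ 5^k both ports yield "MIT^k time"
lemma pvA_2 (N : Int) (h1 : 5 < N) (h2 : N ≤ 25) :
    (pvLoopA N 13 2 5).getD "" = "MIT^2 time" := by
  rw [show (13:Nat) = 12+1 from rfl, pvLoopA_succ, if_pos (by constructor <;> omega)]
  decide

lemma pvB_2 (N : Int) (h1 : 5 < N) (h2 : N ≤ 25) :
    "MIT^" ++ PySem.Int.toStr ((pvBisect N 13 0 13 : Nat) + 1) ++ " time" = "MIT^2 time" := by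
  rw [show (13:Nat) = 12+1 from rfl, pvBisect_succ, if_pos (by omega), if_neg (by norm_num [pvThresholds]; omega)]
  rw [show (12:Nat) = 11+1 from rfl, pvBisect_succ, if_pos (by omega), if_neg (by norm_num [pvThresholds]; omega)]
  rw [show (11:Nat) = 10+1 from rfl, pvBisect_succ, if_pos (by omega), if_neg (by norm_num [pvThresholds]; omega)]
  rw [show (10:Nat) = 9+1 from rfl, pvBisect_succ, if_pos (by omega), if_pos (by norm_num [pvThresholds]; omega)]
  rw [show (9:Nat) = 8+1 from rfl, pvBisect_succ, if_neg (by omega)]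
  norm_num
  decide

lemma pvA_3 (N : Int) (h1 : 25 < N) (h2 : N ≤ 125) :
    (pvLoopA N 13 2 5).getD "" = "MIT^3 time" := by
  rw [show (13:Nat) = 12+1 from rfl, pvLoopA_succ, if_neg (by omega), if_neg (by norm_num)]
  rw [show (12:Nat) = 11+1 from rfl, pvLoopA_succ, if_pos (by constructor <;> omega)]
  decide

lemma pvB_3 (N : Int) (h1 : 25 < N) (h2 : N ≤ 125) :
    "MIT^" ++ PySem.Int.toStr ((pvBisect N 13 0 13 : Nat) + 1) ++ " time" = "MIT^3 time" := by
  rw [show (13:Nat) = 12+1 from rfl, pvBisect_succ, if_pos (by omega), if_neg (by norm_num [pvThresholds]; omega)]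
  rw [show (12:Nat) = 11+1 from rfl, pvBisect_succ, if_pos (by omega), if_neg (by norm_num [pvThresholds]; omega)]
  rw [show (11:Nat) = 10+1 from rfl, pvBisect_succ, if_pos (by omega), if_pos (by norm_num [pvThresholds]; omega)]
  rw [show (10:Nat) = 9+1 from rfl, pvBisect_succ, if_pos (by omega), if_neg (by norm_num [pvThresholds]; omega)]
  rw [show (9:Nat) = 8+1 from rfl, pvBisect_succ, if_neg (by omega)]
  norm_num
  decide

lemma pvA_4 (N : Int) (h1 : 125 < N) (h2 : N ≤ 625) :
    (pvLoopA N 13 2 5).getD "" = "MIT^4 time" := by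
  rw [show (13:Nat) = 12+1 from rfl, pvLoopA_succ, if_neg (by omega), if_neg (by norm_num)]
  rw [show (12:Nat) = 11+1 from rfl, pvLoopA_succ, if_neg (by omega), if_neg (by norm_num)]
  rw [show (11:Nat) = 10+1 from rfl, pvLoopA_succ, if_pos (by constructor <;> omega)]
  decide

lemma pvB_4 (N : Int) (h1 : 125 < N) (h2 : N ≤ 625) :
    "MIT^" ++ PySem.Int.toStr ((pvBisect N 13 0 13 : Nat) + 1) ++ " time" = "MIT^4 time" := by
  rw [show (13:Nat) = 12+1 from rfl, pvBisect_succ, if_pos (by omega), if_neg (by norm_num [pvThresholds]; omega)]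
  rw [show (12:Nat) = 11+1 from rfl, pvBisect_succ, if_pos (by omega), if_neg (by norm_num [pvThresholds]; omega)]
  rw [show (11:Nat) = 10+1 from rfl, pvBisect_succ, if_pos (by omega), if_pos (by norm_num [pvThresholds]; omega)]
  rw [show (10:Nat) = 9+1 from rfl, pvBisect_succ, if_pos (by omega), if_pos (by norm_num [pvThresholds]; omega)]
  rw [show (9:Nat) = 8+1 from rfl, pvBisect_succ, if_neg (by omega)]
  norm_num
  decide

lemma pvA_5 (N : Int) (h1 : 625 < N) (h2 : N ≤ 3125) :
    (pvLoopA N 13 2 5).getD "" = "MIT^5 time" := by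
  rw [show (13:Nat) = 12+1 from rfl, pvLoopA_succ, if_neg (by omega), if_neg (by norm_num)]
  rw [show (12:Nat) = 11+1 from rfl, pvLoopA_succ, if_neg (by omega), if_neg (by norm_num)]
  rw [show (11:Nat) = 10+1 from rfl, pvLoopA_succ, if_neg (by omega), if_neg (by norm_num)]
  rw [show (10:Nat) = 9+1 from rfl, pvLoopA_succ, if_pos (by constructor <;> omega)]
  decide

lemma pvB_5 (N : Int) (h1 : 625 < N) (h2 : N ≤ 3125) :
    "MIT^" ++ PySem.Int.toStr ((pvBisect N 13 0 13 : Nat) + 1) ++ " time" = "MIT^5 time" := by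
  rw [show (13:Nat) = 12+1 from rfl, pvBisect_succ, if_pos (by omega), if_neg (by norm_num [pvThresholds]; omega)]
  rw [show (12:Nat) = 11+1 from rfl, pvBisect_succ, if_pos (by omega), if_pos (by norm_num [pvThresholds]; omega)]
  rw [show (11:Nat) = 10+1 from rfl, pvBisect_succ, if_pos (by omega), if_neg (by norm_num [pvThresholds]; omega)]
  rw [show (10:Nat) = 9+1 from rfl, pvBisect_succ, if_pos (by omega), if_neg (by norm_num [pvThresholds]; omega)]
  rw [show (9:Nat) = 8+1 from rfl, pvBisect_succ, if_neg (by omega)]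
  norm_num
  decide

lemma pvA_6 (N : Int) (h1 : 3125 < N) (h2 : N ≤ 15625) :
    (pvLoopA N 13 2 5).getD "" = "MIT^6 time" := by
  rw [show (13:Nat) = 12+1 from rfl, pvLoopA_succ, if_neg (by omega), if_neg (by norm_num)]
  rw [show (12:Nat) = 11+1 from rfl, pvLoopA_succ, if_neg (by omega), if_neg (by norm_num)]
  rw [show (11:Nat) = 10+1 from rfl, pvLoopA_succ, if_neg (by omega), if_neg (by norm_num)]
  rw [show (10:Nat) = 9+1 from rfl, pvLoopA_succ, if_neg (by omega), if_neg (by norm_num)]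
  rw [show (9:Nat) = 8+1 from rfl, pvLoopA_succ, if_pos (by constructor <;> omega)]
  decide

lemma pvB_6 (N : Int) (h1 : 3125 < N) (h2 : N ≤ 15625) :
    "MIT^" ++ PySem.Int.toStr ((pvBisect N 13 0 13 : Nat) + 1) ++ " time" = "MIT^6 time" := by
  rw [show (13:Nat) = 12+1 from rfl, pvBisect_succ, if_pos (by omega), if_neg (by norm_num [pvThresholds]; omega)]
  rw [show (12:Nat) = 11+1 from rfl, pvBisect_succ, if_pos (by omega), if_pos (by norm_num [pvThresholds]; omega)]
  rw [show (11:Nat) = 10+1 from rfl, pvBisect_succ, if_pos (by omega), if_neg (by norm_num [pvThresholds]; omega)]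
  rw [show (10:Nat) = 9+1 from rfl, pvBisect_succ, if_pos (by omega), if_pos (by norm_num [pvThresholds]; omega)]
  rw [show (9:Nat) = 8+1 from rfl, pvBisect_succ, if_neg (by omega)]
  norm_num
  decide

lemma pvA_7 (N : Int) (h1 : 15625 < N) (h2 : N ≤ 78125) :
    (pvLoopA N 13 2 5).getD "" = "MIT^7 time" := by
  rw [show (13:Nat) = 12+1 from rfl, pvLoopA_succ, if_neg (by omega), if_neg (by norm_num)]
  rw [show (12:Nat) = 11+1 from rfl, pvLoopA_succ, if_neg (by omega), if_neg (by norm_num)]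
  rw [show (11:Nat) = 10+1 from rfl, pvLoopA_succ, if_neg (by omega), if_neg (by norm_num)]
  rw [show (10:Nat) = 9+1 from rfl, pvLoopA_succ, if_neg (by omega), if_neg (by norm_num)]
  rw [show (9:Nat) = 8+1 from rfl, pvLoopA_succ, if_neg (by omega), if_neg (by norm_num)]
  rw [show (8:Nat) = 7+1 from rfl, pvLoopA_succ, if_pos (by constructor <;> omega)]
  decide

lemma pvB_7 (N : Int) (h1 : 15625 < N) (h2 : N ≤ 78125) :
    "MIT^" ++ PySem.Int.toStr ((pvBisect N 13 0 13 : Nat) + 1) ++ " time" = "MIT^7 time" := by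
  rw [show (13:Nat) = 12+1 from rfl, pvBisect_succ, if_pos (by omega), if_neg (by norm_num [pvThresholds]; omega)]
  rw [show (12:Nat) = 11+1 from rfl, pvBisect_succ, if_pos (by omega), if_pos (by norm_num [pvThresholds]; omega)]
  rw [show (11:Nat) = 10+1 from rfl, pvBisect_succ, if_pos (by omega), if_pos (by norm_num [pvThresholds]; omega)]
  rw [show (10:Nat) = 9+1 from rfl, pvBisect_succ, if_neg (by omega)]
  norm_num
  decide

lemma pvA_8 (N : Int) (h1 : 78125 < N) (h2 : N ≤ 390625) :
    (pvLoopA N 13 2 5).getD "" = "MIT^8 time" := by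
  rw [show (13:Nat) = 12+1 from rfl, pvLoopA_succ, if_neg (by omega), if_neg (by norm_num)]
  rw [show (12:Nat) = 11+1 from rfl, pvLoopA_succ, if_neg (by omega), if_neg (by norm_num)]
  rw [show (11:Nat) = 10+1 from rfl, pvLoopA_succ, if_neg (by omega), if_neg (by norm_num)]
  rw [show (10:Nat) = 9+1 from rfl, pvLoopA_succ, if_neg (by omega), if_neg (by norm_num)]
  rw [show (9:Nat) = 8+1 from rfl, pvLoopA_succ, if_neg (by omega), if_neg (by norm_num)]
  rw [show (8:Nat) = 7+1 from rfl, pvLoopA_succ, if_neg (by omega), if_neg (by norm_num)]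
  rw [show (7:Nat) = 6+1 from rfl, pvLoopA_succ, if_pos (by constructor <;> omega)]
  decide

lemma pvB_8 (N : Int) (h1 : 78125 < N) (h2 : N ≤ 390625) :
    "MIT^" ++ PySem.Int.toStr ((pvBisect N 13 0 13 : Nat) + 1) ++ " time" = "MIT^8 time" := by
  rw [show (13:Nat) = 12+1 from rfl, pvBisect_succ, if_pos (by omega), if_pos (by norm_num [pvThresholds]; omega)]
  rw [show (12:Nat) = 11+1 from rfl, pvBisect_succ, if_pos (by omega), if_neg (by norm_num [pvThresholds]; omega)]
  rw [show (11:Nat) = 10+1 from rfl, pvBisect_succ, if_pos (by omega), if_neg (by norm_num [pvThresholds]; omega)]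
  rw [show (10:Nat) = 9+1 from rfl, pvBisect_succ, if_pos (by omega), if_neg (by norm_num [pvThresholds]; omega)]
  rw [show (9:Nat) = 8+1 from rfl, pvBisect_succ, if_neg (by omega)]
  norm_num
  decide

lemma pvA_9 (N : Int) (h1 : 390625 < N) (h2 : N ≤ 1953125) :
    (pvLoopA N 13 2 5).getD "" = "MIT^9 time" := by
  rw [show (13:Nat) = 12+1 from rfl, pvLoopA_succ, if_neg (by omega), if_neg (by norm_num)]
  rw [show (12:Nat) = 11+1 from rfl, pvLoopA_succ, if_neg (by omega), if_neg (by norm_num)]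
  rw [show (11:Nat) = 10+1 from rfl, pvLoopA_succ, if_neg (by omega), if_neg (by norm_num)]
  rw [show (10:Nat) = 9+1 from rfl, pvLoopA_succ, if_neg (by omega), if_neg (by norm_num)]
  rw [show (9:Nat) = 8+1 from rfl, pvLoopA_succ, if_neg (by omega), if_neg (by norm_num)]
  rw [show (8:Nat) = 7+1 from rfl, pvLoopA_succ, if_neg (by omega), if_neg (by norm_num)]
  rw [show (7:Nat) = 6+1 from rfl, pvLoopA_succ, if_neg (by omega), if_neg (by norm_num)]
  rw [show (6:Nat) = 5+1 from rfl, pvLoopA_succ, if_pos (by constructor <;> omega)]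
  decide

lemma pvB_9 (N : Int) (h1 : 390625 < N) (h2 : N ≤ 1953125) :
    "MIT^" ++ PySem.Int.toStr ((pvBisect N 13 0 13 : Nat) + 1) ++ " time" = "MIT^9 time" := by
  rw [show (13:Nat) = 12+1 from rfl, pvBisect_succ, if_pos (by omega), if_pos (by norm_num [pvThresholds]; omega)]
  rw [show (12:Nat) = 11+1 from rfl, pvBisect_succ, if_pos (by omega), if_neg (by norm_num [pvThresholds]; omega)]
  rw [show (11:Nat) = 10+1 from rfl, pvBisect_succ, if_pos (by omega), if_neg (by norm_num [pvThresholds]; omega)]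
  rw [show (10:Nat) = 9+1 from rfl, pvBisect_succ, if_pos (by omega), if_pos (by norm_num [pvThresholds]; omega)]
  rw [show (9:Nat) = 8+1 from rfl, pvBisect_succ, if_neg (by omega)]
  norm_num
  decide

lemma pvA_10 (N : Int) (h1 : 1953125 < N) (h2 : N ≤ 9765625) :
    (pvLoopA N 13 2 5).getD "" = "MIT^10 time" := by
  rw [show (13:Nat) = 12+1 from rfl, pvLoopA_succ, if_neg (by omega), if_neg (by norm_num)]
  rw [show (12:Nat) = 11+1 from rfl, pvLoopA_succ, if_neg (by omega), if_neg (by norm_num)]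
  rw [show (11:Nat) = 10+1 from rfl, pvLoopA_succ, if_neg (by omega), if_neg (by norm_num)]
  rw [show (10:Nat) = 9+1 from rfl, pvLoopA_succ, if_neg (by omega), if_neg (by norm_num)]
  rw [show (9:Nat) = 8+1 from rfl, pvLoopA_succ, if_neg (by omega), if_neg (by norm_num)]
  rw [show (8:Nat) = 7+1 from rfl, pvLoopA_succ, if_neg (by omega), if_neg (by norm_num)]
  rw [show (7:Nat) = 6+1 from rfl, pvLoopA_succ, if_neg (by omega), if_neg (by norm_num)]
  rw [show (6:Nat) = 5+1 from rfl, pvLoopA_succ, if_neg (by omega), if_neg (by norm_num)]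
  rw [show (5:Nat) = 4+1 from rfl, pvLoopA_succ, if_pos (by constructor <;> omega)]
  decide

lemma pvB_10 (N : Int) (h1 : 1953125 < N) (h2 : N ≤ 9765625) :
    "MIT^" ++ PySem.Int.toStr ((pvBisect N 13 0 13 : Nat) + 1) ++ " time" = "MIT^10 time" := by
  rw [show (13:Nat) = 12+1 from rfl, pvBisect_succ, if_pos (by omega), if_pos (by norm_num [pvThresholds]; omega)]
  rw [show (12:Nat) = 11+1 from rfl, pvBisect_succ, if_pos (by omega), if_neg (by norm_num [pvThresholds]; omega)]
  rw [show (11:Nat) = 10+1 from rfl, pvBisect_succ, if_pos (by omega), if_pos (by norm_num [pvThresholds]; omega)]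
  rw [show (10:Nat) = 9+1 from rfl, pvBisect_succ, if_pos (by omega), if_neg (by norm_num [pvThresholds]; omega)]
  rw [show (9:Nat) = 8+1 from rfl, pvBisect_succ, if_neg (by omega)]
  norm_num
  decide

lemma pvA_11 (N : Int) (h1 : 9765625 < N) (h2 : N ≤ 48828125) :
    (pvLoopA N 13 2 5).getD "" = "MIT^11 time" := by
  rw [show (13:Nat) = 12+1 from rfl, pvLoopA_succ, if_neg (by omega), if_neg (by norm_num)]
  rw [show (12:Nat) = 11+1 from rfl, pvLoopA_succ, if_neg (by omega), if_neg (by norm_num)]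
  rw [show (11:Nat) = 10+1 from rfl, pvLoopA_succ, if_neg (by omega), if_neg (by norm_num)]
  rw [show (10:Nat) = 9+1 from rfl, pvLoopA_succ, if_neg (by omega), if_neg (by norm_num)]
  rw [show (9:Nat) = 8+1 from rfl, pvLoopA_succ, if_neg (by omega), if_neg (by norm_num)]
  rw [show (8:Nat) = 7+1 from rfl, pvLoopA_succ, if_neg (by omega), if_neg (by norm_num)]
  rw [show (7:Nat) = 6+1 from rfl, pvLoopA_succ, if_neg (by omega), if_neg (by norm_num)]
  rw [show (6:Nat) = 5+1 from rfl, pvLoopA_succ, if_neg (by omega), if_neg (by norm_num)]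
  rw [show (5:Nat) = 4+1 from rfl, pvLoopA_succ, if_neg (by omega), if_neg (by norm_num)]
  rw [show (4:Nat) = 3+1 from rfl, pvLoopA_succ, if_pos (by constructor <;> omega)]
  decide

lemma pvB_11 (N : Int) (h1 : 9765625 < N) (h2 : N ≤ 48828125) :
    "MIT^" ++ PySem.Int.toStr ((pvBisect N 13 0 13 : Nat) + 1) ++ " time" = "MIT^11 time" := by
  rw [show (13:Nat) = 12+1 from rfl, pvBisect_succ, if_pos (by omega), if_pos (by norm_num [pvThresholds]; omega)]
  rw [show (12:Nat) = 11+1 from rfl, pvBisect_succ, if_pos (by omega), if_neg (by norm_num [pvThresholds]; omega)]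
  rw [show (11:Nat) = 10+1 from rfl, pvBisect_succ, if_pos (by omega), if_pos (by norm_num [pvThresholds]; omega)]
  rw [show (10:Nat) = 9+1 from rfl, pvBisect_succ, if_pos (by omega), if_pos (by norm_num [pvThresholds]; omega)]
  rw [show (9:Nat) = 8+1 from rfl, pvBisect_succ, if_neg (by omega)]
  norm_num
  decide

lemma pvA_12 (N : Int) (h1 : 48828125 < N) (h2 : N ≤ 244140625) :
    (pvLoopA N 13 2 5).getD "" = "MIT^12 time" := by
  rw [show (13:Nat) = 12+1 from rfl, pvLoopA_succ, if_neg (by omega), if_neg (by norm_num)]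
  rw [show (12:Nat) = 11+1 from rfl, pvLoopA_succ, if_neg (by omega), if_neg (by norm_num)]
  rw [show (11:Nat) = 10+1 from rfl, pvLoopA_succ, if_neg (by omega), if_neg (by norm_num)]
  rw [show (10:Nat) = 9+1 from rfl, pvLoopA_succ, if_neg (by omega), if_neg (by norm_num)]
  rw [show (9:Nat) = 8+1 from rfl, pvLoopA_succ, if_neg (by omega), if_neg (by norm_num)]
  rw [show (8:Nat) = 7+1 from rfl, pvLoopA_succ, if_neg (by omega), if_neg (by norm_num)]
  rw [show (7:Nat) = 6+1 from rfl, pvLoopA_succ, if_neg (by omega), if_neg (by norm_num)]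
  rw [show (6:Nat) = 5+1 from rfl, pvLoopA_succ, if_neg (by omega), if_neg (by norm_num)]
  rw [show (5:Nat) = 4+1 from rfl, pvLoopA_succ, if_neg (by omega), if_neg (by norm_num)]
  rw [show (4:Nat) = 3+1 from rfl, pvLoopA_succ, if_neg (by omega), if_neg (by norm_num)]
  rw [show (3:Nat) = 2+1 from rfl, pvLoopA_succ, if_pos (by constructor <;> omega)]
  decide

lemma pvB_12 (N : Int) (h1 : 48828125 < N) (h2 : N ≤ 244140625) :
    "MIT^" ++ PySem.Int.toStr ((pvBisect N 13 0 13 : Nat) + 1) ++ " time" = "MIT^12 time" := by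
  rw [show (13:Nat) = 12+1 from rfl, pvBisect_succ, if_pos (by omega), if_pos (by norm_num [pvThresholds]; omega)]
  rw [show (12:Nat) = 11+1 from rfl, pvBisect_succ, if_pos (by omega), if_pos (by norm_num [pvThresholds]; omega)]
  rw [show (11:Nat) = 10+1 from rfl, pvBisect_succ, if_pos (by omega), if_neg (by norm_num [pvThresholds]; omega)]
  rw [show (10:Nat) = 9+1 from rfl, pvBisect_succ, if_pos (by omega), if_neg (by norm_num [pvThresholds]; omega)]
  rw [show (9:Nat) = 8+1 from rfl, pvBisect_succ, if_neg (by omega)]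
  norm_num
  decide

lemma pvA_13 (N : Int) (h1 : 244140625 < N) (h2 : N ≤ 1220703125) :
    (pvLoopA N 13 2 5).getD "" = "MIT^13 time" := by
  rw [show (13:Nat) = 12+1 from rfl, pvLoopA_succ, if_neg (by omega), if_neg (by norm_num)]
  rw [show (12:Nat) = 11+1 from rfl, pvLoopA_succ, if_neg (by omega), if_neg (by norm_num)]
  rw [show (11:Nat) = 10+1 from rfl, pvLoopA_succ, if_neg (by omega), if_neg (by norm_num)]
  rw [show (10:Nat) = 9+1 from rfl, pvLoopA_succ, if_neg (by omega), if_neg (by norm_num)]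
  rw [show (9:Nat) = 8+1 from rfl, pvLoopA_succ, if_neg (by omega), if_neg (by norm_num)]
  rw [show (8:Nat) = 7+1 from rfl, pvLoopA_succ, if_neg (by omega), if_neg (by norm_num)]
  rw [show (7:Nat) = 6+1 from rfl, pvLoopA_succ, if_neg (by omega), if_neg (by norm_num)]
  rw [show (6:Nat) = 5+1 from rfl, pvLoopA_succ, if_neg (by omega), if_neg (by norm_num)]
  rw [show (5:Nat) = 4+1 from rfl, pvLoopA_succ, if_neg (by omega), if_neg (by norm_num)]
  rw [show (4:Nat) = 3+1 from rfl, pvLoopA_succ, if_neg (by omega), if_neg (by norm_num)]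
  rw [show (3:Nat) = 2+1 from rfl, pvLoopA_succ, if_neg (by omega), if_neg (by norm_num)]
  rw [show (2:Nat) = 1+1 from rfl, pvLoopA_succ, if_pos (by constructor <;> omega)]
  decide

lemma pvB_13 (N : Int) (h1 : 244140625 < N) (h2 : N ≤ 1220703125) :
    "MIT^" ++ PySem.Int.toStr ((pvBisect N 13 0 13 : Nat) + 1) ++ " time" = "MIT^13 time" := by
  rw [show (13:Nat) = 12+1 from rfl, pvBisect_succ, if_pos (by omega), if_pos (by norm_num [pvThresholds]; omega)]
  rw [show (12:Nat) = 11+1 from rfl, pvBisect_succ, if_pos (by omega), if_pos (by norm_num [pvThresholds]; omega)]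
  rw [show (11:Nat) = 10+1 from rfl, pvBisect_succ, if_pos (by omega), if_neg (by norm_num [pvThresholds]; omega)]
  rw [show (10:Nat) = 9+1 from rfl, pvBisect_succ, if_pos (by omega), if_pos (by norm_num [pvThresholds]; omega)]
  rw [show (9:Nat) = 8+1 from rfl, pvBisect_succ, if_neg (by omega)]
  norm_num
  decide

-- ===== VERDICT (by name: the statement is the Claim_ definition above) =====
theorem get_mit_time_classification_spec : Claim_equal_get_mit_time_classification := by
  intro N _ hPre
  unfold Spec_get_mit_time_classification get_mit_time_classification get_mit_time_classification_alt
  unfold Pre_get_mit_time_classification at hPre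
  by_cases h5 : N ≤ 5
  · simp [h5]
  simp only [if_neg h5]
  by_cases h2 : N ≤ 25
  · rw [pvA_2 N (by omega) h2, pvB_2 N (by omega) h2]
  by_cases h3 : N ≤ 125
  · rw [pvA_3 N (by omega) h3, pvB_3 N (by omega) h3]
  by_cases h4 : N ≤ 625
  · rw [pvA_4 N (by omega) h4, pvB_4 N (by omega) h4]
  by_cases h5 : N ≤ 3125
  · rw [pvA_5 N (by omega) h5, pvB_5 N (by omega) h5]
  by_cases h6 : N ≤ 15625
  · rw [pvA_6 N (by omega) h6, pvB_6 N (by omega) h6]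
  by_cases h7 : N ≤ 78125
  · rw [pvA_7 N (by omega) h7, pvB_7 N (by omega) h7]
  by_cases h8 : N ≤ 390625
  · rw [pvA_8 N (by omega) h8, pvB_8 N (by omega) h8]
  by_cases h9 : N ≤ 1953125
  · rw [pvA_9 N (by omega) h9, pvB_9 N (by omega) h9]
  by_cases h10 : N ≤ 9765625
  · rw [pvA_10 N (by omega) h10, pvB_10 N (by omega) h10]
  by_cases h11 : N ≤ 48828125
  · rw [pvA_11 N (by omega) h11, pvB_11 N (by omega) h11]
  by_cases h12 : N ≤ 244140625
  · rw [pvA_12 N (by omega) h12, pvB_12 N (by omega) h12]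
  by_cases h13 : N ≤ 1220703125
  · rw [pvA_13 N (by omega) h13, pvB_13 N (by omega) h13]
  omega
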